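-- pv_equiv track=rewrite | github.com/Mariel-Huerta-Esc/ejercicios-data-analist | 9.py | meses_extremos
-- ===== SOURCE A (Python) =====
-- def meses_extremos(ventas, meses):
--     venta_minima = ventas[0]
--     venta_maxima = ventas[0]
--     mes_venta_minima = meses[0]
--     mes_venta_maxima = meses[0]
--
--     for venta, mes in zip(ventas, meses):
--         if venta < venta_minima:
--             venta_minima = venta
--             mes_venta_minima = mes
--         if venta > venta_maxima:
--             venta_maxima = venta
--             mes_venta_maxima = mes
--
--     diccionario = {
--         "mes venta minima": mes_venta_minima,
--         "mes venta maxima": mes_venta_maxima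
--     }
--
--     return diccionario
-- ===== SOURCE B (Python) =====
-- def meses_extremos(ventas, meses):
--     pares = list(zip(ventas, meses))
--     asc = sorted(pares, key=lambda p: p[0])
--     desc = sorted(pares, key=lambda p: -p[0])
--     return {
--         "mes venta minima": asc[0][1],
--         "mes venta maxima": desc[0][1],
--     }
-- ===== Notes on version B (the rewrite author's own statement) =====
-- stated objective: alternative
-- what changed: Replaces A's single fused tracking loop with a sort-then-pick algorithm: stable-sort the zipped (venta, mes) pairs by sale (and by negated sale) and take the head of each sorted list, relying on sort stability to reproduce A's first-occurrence tie-breaking.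
import Mathlib
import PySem

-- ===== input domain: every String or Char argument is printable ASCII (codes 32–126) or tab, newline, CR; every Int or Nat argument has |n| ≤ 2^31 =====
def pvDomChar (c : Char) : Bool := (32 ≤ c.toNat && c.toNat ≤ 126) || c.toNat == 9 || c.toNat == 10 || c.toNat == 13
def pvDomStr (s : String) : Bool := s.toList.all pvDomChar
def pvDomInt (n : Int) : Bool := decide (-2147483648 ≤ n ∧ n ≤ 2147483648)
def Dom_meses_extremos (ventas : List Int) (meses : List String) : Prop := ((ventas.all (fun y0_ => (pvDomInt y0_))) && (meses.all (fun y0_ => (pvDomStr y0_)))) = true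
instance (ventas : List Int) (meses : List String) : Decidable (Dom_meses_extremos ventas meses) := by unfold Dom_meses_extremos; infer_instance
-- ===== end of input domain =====

-- B replaces A's fused linear tracking loop with a sort-then-pick algorithm: two
-- stable sorts of the zipped pairs (by sale, and by negated sale) whose heads give
-- the first-occurrence min and max months (objective: alternative).

-- ===== PORT A =====
-- A's loop over zip(ventas, meses) with state (venta_minima, mes_venta_minima, venta_maxima, mes_venta_maxima)
def mesesExtremosLoop (l : List (Int × String)) (st : Int × String × Int × String) :
    Int × String × Int × String :=
  l.foldl (fun st p =>
    let st1 := if p.1 < st.1 then (p.1, p.2, st.2.2.1, st.2.2.2) else st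
    if p.1 > st1.2.2.1 then (st1.1, st1.2.1, p.1, p.2) else st1) st

def meses_extremos (ventas : List Int) (meses : List String) : List (String × String) :=
  match ventas, meses with
  | v0 :: _, m0 :: _ =>
    let r := mesesExtremosLoop (ventas.zip meses) (v0, m0, v0, m0)
    [("mes venta minima", r.2.1), ("mes venta maxima", r.2.2.2)]
  | _, _ => []  -- ventas[0] / meses[0] raises IndexError in Python; excluded by Pre_

-- ===== PORT B =====
def meses_extremos_alt (ventas : List Int) (meses : List String) : List (String × String) :=
  let pares := ventas.zip meses
  let asc := PySem.List.sorted pares (fun p => p.1) false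
  let desc := PySem.List.sorted pares (fun p => (-p.1 : Int)) false
  match asc.head?, desc.head? with  -- asc[0] / desc[0]
  | some a, some d => [("mes venta minima", a.2), ("mes venta maxima", d.2)]
  | _, _ => []  -- asc[0] raises IndexError on empty input; excluded by Pre_

-- ===== PRECONDITION & SPEC =====
-- A raises IndexError when ventas or meses is empty (and B's asc[0] raises there too).
def Pre_meses_extremos (ventas : List Int) (meses : List String) : Prop :=
  ventas ≠ [] ∧ meses ≠ []
instance (ventas : List Int) (meses : List String) : Decidable (Pre_meses_extremos ventas meses) := by unfold Pre_meses_extremos; infer_instance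

def pvWitness_meses_extremos : List Int × List String :=
  ([3, 1, 2], ["ene", "feb", "mar"])

def Spec_meses_extremos (ventas : List Int) (meses : List String) (out : List (String × String)) : Prop := out = meses_extremos_alt ventas meses
instance (ventas : List Int) (meses : List String) (out : List (String × String)) : Decidable (Spec_meses_extremos ventas meses out) := by unfold Spec_meses_extremos; infer_instance

-- ===== CLAIM (what is proved, stated in full; the proofs are below) =====
def Claim_equal_meses_extremos : Prop := ∀ (ventas : List Int) (meses : List String), Dom_meses_extremos ventas meses → Pre_meses_extremos ventas meses → Spec_meses_extremos ventas meses (meses_extremos ventas meses)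

-- ===== LEMMAS AND PROOFS =====

-- The combined fold splits into an independent running-min fold and running-max fold.
lemma loop_split (l : List (Int × String)) (a : Int × String) (b : Int × String) :
    mesesExtremosLoop l (a.1, a.2, b.1, b.2) =
      (( l.foldl (fun m p => if p.1 < m.1 then p else m) a).1,
       ( l.foldl (fun m p => if p.1 < m.1 then p else m) a).2,
       ( l.foldl (fun m p => if m.1 < p.1 then p else m) b).1,
       ( l.foldl (fun m p => if m.1 < p.1 then p else m) b).2) := by
  induction l generalizing a b with
  | nil => simp [mesesExtremosLoop]
  | cons p t ih =>
    simp only [mesesExtremosLoop, List.foldl_cons] at *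
    by_cases h1 : p.1 < a.1 <;> by_cases h2 : b.1 < p.1 <;>
      simp [h1, h2, gt_iff_lt, ih]

-- Head of the insertion-sort fold = the first-strict-extremum fold over the keys.
lemma head_foldl_insertBy (key : Int × String → Int) (t : List (Int × String))
    (h : Int × String) (rest : List (Int × String)) :
    (t.foldl (fun acc x =>
        PySem.List.insertBy (fun a b => decide (key a < key b)) x acc) (h :: rest)).head? =
      some (t.foldl (fun m q => if key q < key m then q else m) h) := by
  induction t generalizing h rest with
  | nil => rfl
  | cons x t ih =>
    simp only [List.foldl_cons]
    by_cases hx : key x < key h <;>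
      simp [PySem.List.insertBy, hx, ih]

-- Head of the stable sort = the first element with minimal key (A's running fold).
lemma head_sorted (key : Int × String → Int) (p : Int × String) (t : List (Int × String)) :
    (PySem.List.sorted (p :: t) key false).head? =
      some (t.foldl (fun m q => if key q < key m then q else m) p) := by
  rw [PySem.List.sorted_eq_foldl_insertBy]
  simp only [List.foldl_cons]
  have : PySem.List.insertBy (fun a b => decide (key a < key b)) p ([] : List (Int × String))
      = [p] := rfl
  rw [this]
  exact head_foldl_insertBy key t p []

-- ===== VERDICT (by name: the statement is the Claim_ definition above) =====
theorem meses_extremos_spec : Claim_equal_meses_extremos := by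
  intro ventas meses _ hpre
  obtain ⟨hv, hm⟩ := hpre
  unfold Spec_meses_extremos
  cases ventas with
  | nil => exact absurd rfl hv
  | cons v0 vt =>
    cases meses with
    | nil => exact absurd rfl hm
    | cons m0 mt =>
      unfold meses_extremos meses_extremos_alt
      simp only [List.zip_cons_cons]
      have hmin := head_sorted (fun p => p.1) (v0, m0) (vt.zip mt)
      have hmax := head_sorted (fun p => (-p.1 : Int)) (v0, m0) (vt.zip mt)
      have hsplit := loop_split ((v0, m0) :: vt.zip mt) (v0, m0) (v0, m0)
      simp only [List.foldl_cons, lt_self_iff_false, if_false] at hsplit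
      have hfold : (fun (m q : Int × String) => if (-q.1 : Int) < -m.1 then q else m)
          = fun m q => if m.1 < q.1 then q else m := by
        funext m q
        simp only [neg_lt_neg_iff]
      rw [hfold] at hmax
      rw [hmin, hmax]
      simp only [hsplit]
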